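-- pv_equiv track=rewrite | github.com/mariux255/ASL_Project | preprocessing.py | define_categories
-- ===== SOURCE A (Python) =====
-- def define_categories(count_dictionary):
-- 	count = 0
-- 	labels_100 = []
-- 	labels_200 = []
-- 	labels_500 = []
-- 	labels_1000 = []
-- 	labels_2000 = []
--
-- 	for key in count_dictionary:
-- 		if count<100:
-- 			labels_100.append(key)
-- 		if count<200:
-- 			labels_200.append(key)
-- 		if count<500:
-- 			labels_500.append(key)
-- 		if count<1000:
-- 			labels_1000.append(key)
--
-- 		labels_2000.append(key)
--
-- 		count += 1
--
-- 	return labels_100, labels_200, labels_500, labels_1000, labels_2000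
-- ===== SOURCE B (Python) =====
-- def define_categories(count_dictionary):
--     keys = list(count_dictionary)
--     return keys[:100], keys[:200], keys[:500], keys[:1000], keys[:]
-- ===== Notes on version B (the rewrite author's own statement) =====
-- stated objective: simpler
-- what changed: Replaces the explicit loop with a running counter and four conditional appends by materializing the keys once and returning closed-form prefix slices keys[:100], keys[:200], keys[:500], keys[:1000], keys[:].
import Mathlib
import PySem

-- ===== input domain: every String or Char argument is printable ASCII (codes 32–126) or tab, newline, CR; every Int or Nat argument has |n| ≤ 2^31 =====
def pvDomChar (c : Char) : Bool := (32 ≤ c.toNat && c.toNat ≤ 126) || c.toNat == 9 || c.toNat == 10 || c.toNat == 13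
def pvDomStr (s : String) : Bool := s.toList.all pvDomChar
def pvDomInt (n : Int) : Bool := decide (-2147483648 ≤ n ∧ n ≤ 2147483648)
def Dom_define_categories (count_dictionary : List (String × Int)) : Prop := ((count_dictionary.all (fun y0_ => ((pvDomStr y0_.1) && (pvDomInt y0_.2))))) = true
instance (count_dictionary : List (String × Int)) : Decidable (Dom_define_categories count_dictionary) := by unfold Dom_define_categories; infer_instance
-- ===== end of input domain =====

-- B replaces A's counter loop with four conditional appends by closed-form prefix slices of the key list; same O(n) cost, simpler.

-- ===== PORT A =====
-- A iterates over the dict's keys with a running count, appending the key to each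
-- labels list whose threshold the count has not yet reached.
def defineCategoriesLoop (keys : List String) (count : Int)
    (l1 l2 l3 l4 l5 : List String) :
    List String × List String × List String × List String × List String :=
  match keys with
  | [] => (l1, l2, l3, l4, l5)
  | k :: ks =>
      defineCategoriesLoop ks (count + 1)
        (if count < 100 then l1 ++ [k] else l1)
        (if count < 200 then l2 ++ [k] else l2)
        (if count < 500 then l3 ++ [k] else l3)
        (if count < 1000 then l4 ++ [k] else l4)
        (l5 ++ [k])

def define_categories (count_dictionary : List (String × Int)) : List String × List String × List String × List String × List String :=
  defineCategoriesLoop (count_dictionary.map Prod.fst) 0 [] [] [] [] []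

-- ===== PORT B =====
-- keys = list(count_dictionary); return keys[:100], keys[:200], keys[:500], keys[:1000], keys[:]
def define_categories_alt (count_dictionary : List (String × Int)) : List String × List String × List String × List String × List String :=
  let keys := count_dictionary.map Prod.fst
  (keys.take 100, keys.take 200, keys.take 500, keys.take 1000, keys)

-- ===== PRECONDITION & SPEC =====
def Spec_define_categories (count_dictionary : List (String × Int)) (out : List String × List String × List String × List String × List String) : Prop := out = define_categories_alt count_dictionary
instance (count_dictionary : List (String × Int)) (out : List String × List String × List String × List String × List String) : Decidable (Spec_define_categories count_dictionary out) := by unfold Spec_define_categories; infer_instance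

-- ===== CLAIM (what is proved, stated in full; the proofs are below) =====
def Claim_equal_define_categories : Prop := ∀ (count_dictionary : List (String × Int)), Dom_define_categories count_dictionary → Spec_define_categories count_dictionary (define_categories count_dictionary)

-- ===== LEMMAS AND PROOFS =====

theorem defineCategoriesLoop_eq (keys : List String) (count : Int)
    (l1 l2 l3 l4 l5 : List String) :
    defineCategoriesLoop keys count l1 l2 l3 l4 l5 =
      (l1 ++ keys.take (100 - count).toNat,
       l2 ++ keys.take (200 - count).toNat,
       l3 ++ keys.take (500 - count).toNat,
       l4 ++ keys.take (1000 - count).toNat,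
       l5 ++ keys) := by
  induction keys generalizing count l1 l2 l3 l4 l5 with
  | nil => simp [defineCategoriesLoop]
  | cons k ks ih =>
      rw [defineCategoriesLoop, ih]
      have h1 : ∀ (n : Int) (l : List String),
          (if count < n then l ++ [k] else l) ++ ks.take (n - (count + 1)).toNat
            = l ++ (k :: ks).take (n - count).toNat := by
        intro n l
        by_cases h : count < n
        · have : (n - count).toNat = (n - (count + 1)).toNat + 1 := by omega
          simp [h, this, List.take_succ_cons]
        · have h0 : (n - count).toNat = 0 := by omega
          have h0' : (n - (count + 1)).toNat = 0 := by omega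
          simp [h, h0, h0']
      simp only [h1]
      simp

theorem define_categories_spec' (count_dictionary : List (String × Int)) :
    define_categories count_dictionary = define_categories_alt count_dictionary := by
  simp [define_categories, define_categories_alt, defineCategoriesLoop_eq]

-- ===== VERDICT (by name: the statement is the Claim_ definition above) =====
theorem define_categories_spec : Claim_equal_define_categories := by
  intro cd _
  exact define_categories_spec' cd
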